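-- pv_equiv track=rewrite | github.com/CyberCRI/projects-backend | services/crisalid/management/commands/populate_crisalid.py | sanitize_languages
-- ===== SOURCE A (Python) =====
-- def sanitize_languages(values: list[dict[str, str]]) -> str:
--     maps_languages = {}
--
--     for value in values:
--         maps_languages[value['language']] = value["value"]
--
--     if not maps_languages:
--         return ""
--
--     return (
--         maps_languages.get("en") or
--         maps_languages.get("fr") or
--         next(iter(maps_languages.values()))
--     )
-- ===== SOURCE B (Python) =====
-- def sanitize_languages(values: list[dict[str, str]]) -> str:
--     if not values:
--         return ""
--     first_lang = values[0]['language']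
--     en = fr = first_val = None
--     for value in values:
--         lang = value['language']
--         val = value['value']
--         if lang == 'en':
--             en = val
--         if lang == 'fr':
--             fr = val
--         if lang == first_lang:
--             first_val = val
--     return en or fr or first_val
-- ===== Notes on version B (the rewrite author's own statement) =====
-- stated objective: alternative
-- what changed: Replaces A's build-a-dict-then-three-lookups with a single forward pass maintaining three accumulators (last 'en' value, last 'fr' value, last value of the first-seen language) chained with or; no dict or map is ever built.
-- outside the precondition, e.g. on sanitize_languages([{'value': 'x'}]): A raises KeyError, B raises KeyError; on sanitize_languages([{'language': 'en'}]): A raises KeyError, B raises KeyError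
import Mathlib
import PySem

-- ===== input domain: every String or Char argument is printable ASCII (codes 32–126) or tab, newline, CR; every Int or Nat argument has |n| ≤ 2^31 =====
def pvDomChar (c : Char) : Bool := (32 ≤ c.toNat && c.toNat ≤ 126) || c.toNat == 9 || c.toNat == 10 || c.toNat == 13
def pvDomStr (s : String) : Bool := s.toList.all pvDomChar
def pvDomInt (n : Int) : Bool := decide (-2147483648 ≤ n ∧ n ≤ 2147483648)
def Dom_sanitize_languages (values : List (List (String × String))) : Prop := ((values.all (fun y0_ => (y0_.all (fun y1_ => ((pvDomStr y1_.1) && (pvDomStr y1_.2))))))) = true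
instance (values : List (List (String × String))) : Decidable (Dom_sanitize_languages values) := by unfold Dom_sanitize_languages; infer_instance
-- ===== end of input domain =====

-- B replaces A's build-a-dict-then-look-up by one forward pass keeping three accumulators
-- (last 'en' value, last 'fr' value, last value of the first-seen language); equal return value on Pre_.

-- ===== PORT A =====

-- value[k] on an inner dict (assoc list, first match); none = KeyError
def pvLookup (v : List (String × String)) (k : String) : Option String :=
  (v.find? (fun p => p.1 == k)).map (·.2)

-- Python's `x or y` for x an Optional[str] ('' and None are falsy)
def pyOr (a : Option String) (b : String) : String :=
  match a with
  | none => b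
  | some s => if s = "" then b else s

-- one iteration of A's loop: maps_languages[value['language']] = value['value']; none once a KeyError occurred
def pvStep (m : Option (PySem.Dict String String)) (value : List (String × String)) :
    Option (PySem.Dict String String) :=
  match m with
  | none => none
  | some d =>
    match pvLookup value "language", pvLookup value "value" with
    | some l, some w => some (d.insert l w)
    | _, _ => none

def sanitize_languages (values : List (List (String × String))) : String :=
  match values.foldl pvStep (some PySem.Dict.empty) with
  | none => ""  -- KeyError path, excluded by Pre_
  | some maps_languages =>
    match maps_languages.items with
    | [] => ""
    | p :: _ =>  -- next(iter(maps_languages.values())) = p.2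
      pyOr (maps_languages.get? "en") (pyOr (maps_languages.get? "fr") p.2)

-- ===== PORT B =====

-- one iteration of B's loop over the accumulator triple (en, fr, first_val); none once a KeyError occurred
def pvStepB (first_lang : String)
    (st : Option (Option String × Option String × Option String))
    (value : List (String × String)) :
    Option (Option String × Option String × Option String) :=
  match st with
  | none => none
  | some (en, fr, fv) =>
    match pvLookup value "language", pvLookup value "value" with
    | some lang, some val =>
      some ((if lang = "en" then some val else en),
            (if lang = "fr" then some val else fr),
            (if lang = first_lang then some val else fv))
    | _, _ => none

def sanitize_languages_alt (values : List (List (String × String))) : String :=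
  match values with
  | [] => ""
  | v0 :: _ =>
    match pvLookup v0 "language" with
    | none => ""  -- KeyError on values[0]['language'], excluded by Pre_
    | some first_lang =>
      match values.foldl (pvStepB first_lang) (some (none, none, none)) with
      | none => ""  -- KeyError in the loop, excluded by Pre_
      | some (en, fr, fv) => pyOr en (pyOr fr (fv.getD ""))

-- ===== PRECONDITION & SPEC =====
-- Pre_ excludes inner lists missing a "language" or "value" key (A raises KeyError) and inner
-- lists with duplicate keys, which a Python dict argument cannot represent (their lookup order
-- is a modelling artefact of the assoc-list encoding).
def Pre_sanitize_languages (values : List (List (String × String))) : Prop :=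
  ∀ v ∈ values, (pvLookup v "language").isSome = true ∧ (pvLookup v "value").isSome = true ∧
    (v.map Prod.fst).Nodup
instance (values : List (List (String × String))) : Decidable (Pre_sanitize_languages values) := by
  unfold Pre_sanitize_languages; infer_instance

def pvWitness_sanitize_languages : (List (List (String × String))) :=
  [[("language", "de"), ("value", "Hallo")], [("language", "fr"), ("value", "salut")]]

def Spec_sanitize_languages (values : List (List (String × String))) (out : String) : Prop := out = sanitize_languages_alt values
instance (values : List (List (String × String))) (out : String) : Decidable (Spec_sanitize_languages values out) := by unfold Spec_sanitize_languages; infer_instance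

-- ===== CLAIM (what is proved, stated in full; the proofs are below) =====
def Claim_equal_sanitize_languages : Prop := ∀ (values : List (List (String × String))), Dom_sanitize_languages values → Pre_sanitize_languages values → Spec_sanitize_languages values (sanitize_languages values)

-- ===== LEMMAS AND PROOFS =====

-- proof-side helpers: the defaulted field accessors and the pure (never-raising) loop bodies
def pvLangD (v : List (String × String)) : String := (pvLookup v "language").getD ""
def pvValD (v : List (String × String)) : String := (pvLookup v "value").getD ""
def pvPure (d : PySem.Dict String String) (v : List (String × String)) : PySem.Dict String String :=
  d.insert (pvLangD v) (pvValD v)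
def pvPureB (fl : String) (st : Option String × Option String × Option String)
    (v : List (String × String)) : Option String × Option String × Option String :=
  ((if pvLangD v = "en" then some (pvValD v) else st.1),
   (if pvLangD v = "fr" then some (pvValD v) else st.2.1),
   (if pvLangD v = fl then some (pvValD v) else st.2.2))

lemma pvFold_eq (vs : List (List (String × String))) (d : PySem.Dict String String)
    (h : ∀ v ∈ vs, (pvLookup v "language").isSome = true ∧ (pvLookup v "value").isSome = true) :
    vs.foldl pvStep (some d) = some (vs.foldl pvPure d) := by
  induction vs generalizing d with
  | nil => rfl
  | cons v vs ih =>
    obtain ⟨h1, h2⟩ := h v (by simp)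
    obtain ⟨l, hl⟩ := Option.isSome_iff_exists.mp h1
    obtain ⟨w, hw⟩ := Option.isSome_iff_exists.mp h2
    simp only [List.foldl_cons, pvStep, hl, hw]
    rw [ih _ (fun x hx => h x (by simp [hx]))]
    congr 2
    simp [pvPure, pvLangD, pvValD, hl, hw]

lemma pvFoldB_eq (fl : String) (vs : List (List (String × String)))
    (st : Option String × Option String × Option String)
    (h : ∀ v ∈ vs, (pvLookup v "language").isSome = true ∧ (pvLookup v "value").isSome = true) :
    vs.foldl (pvStepB fl) (some st) = some (vs.foldl (pvPureB fl) st) := by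
  induction vs generalizing st with
  | nil => rfl
  | cons v vs ih =>
    obtain ⟨en, fr, fv⟩ := st
    obtain ⟨h1, h2⟩ := h v (by simp)
    obtain ⟨l, hl⟩ := Option.isSome_iff_exists.mp h1
    obtain ⟨w, hw⟩ := Option.isSome_iff_exists.mp h2
    simp only [List.foldl_cons, pvStepB, hl, hw]
    rw [ih _ (fun x hx => h x (by simp [hx]))]
    congr 2
    simp [pvPureB, pvLangD, pvValD, hl, hw]

lemma get?_pvPure_foldl (vs : List (List (String × String))) (d : PySem.Dict String String)
    (k : String) :
    (vs.foldl pvPure d).get? k =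
      ((vs.reverse.find? (fun v => pvLangD v == k)).map pvValD).or (d.get? k) := by
  induction vs generalizing d with
  | nil => simp
  | cons v vs ih =>
    simp only [List.foldl_cons, List.reverse_cons, List.find?_append]
    rw [ih]
    cases hfind : vs.reverse.find? (fun v => pvLangD v == k) with
    | some u => simp
    | none =>
      by_cases hk : pvLangD v = k
      · simp [pvPure, hk, PySem.Dict.get?_insert_self, List.find?]
      · have hne : (pvLangD v == k) = false := by simp [hk]
        have hins : (d.insert (pvLangD v) (pvValD v)).get? k = d.get? k :=
          PySem.Dict.get?_insert_of_ne d (pvValD v) (Ne.symm hk)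
        simp [List.find?, hne, pvPure, hins]

-- generic characterization of one accumulator component of B's pure fold
lemma sel_pvPureB_foldl (fl k : String)
    (sel : (Option String × Option String × Option String) → Option String)
    (hsel : ∀ st v, sel (pvPureB fl st v) = if pvLangD v = k then some (pvValD v) else sel st)
    (vs : List (List (String × String))) (st : Option String × Option String × Option String) :
    sel (vs.foldl (pvPureB fl) st) =
      ((vs.reverse.find? (fun v => pvLangD v == k)).map pvValD).or (sel st) := by
  induction vs generalizing st with
  | nil => simp
  | cons v vs ih =>
    simp only [List.foldl_cons, List.reverse_cons, List.find?_append]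
    rw [ih]
    cases hfind : vs.reverse.find? (fun v => pvLangD v == k) with
    | some u => simp
    | none =>
      by_cases hk : pvLangD v = k
      · simp [hsel, hk, List.find?]
      · have hne : (pvLangD v == k) = false := by simp [hk]
        simp [hsel, hk, List.find?, hne]

lemma head_pvPure_foldl (vs : List (List (String × String))) (d : PySem.Dict String String)
    (p : String × String) (t : List (String × String))
    (h : d.items = p :: t) :
    ∃ w t', (vs.foldl pvPure d).items = (p.1, w) :: t' := by
  induction vs generalizing d p t with
  | nil => exact ⟨p.2, t, by simp [h]⟩
  | cons v vs ih =>
    simp only [List.foldl_cons]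
    by_cases hc : d.contains (pvLangD v) = true
    · have hitems := PySem.Dict.items_insert_of_contains (d := d) (v := pvValD v) hc
      rw [h] at hitems
      by_cases hp : p.1 = pvLangD v
      · rw [hp]
        exact ih (pvPure d v) (pvLangD v, pvValD v) _ (by simpa [pvPure, hp] using hitems)
      · exact ih (pvPure d v) p _ (by simpa [pvPure, hp] using hitems)
    · have hitems := PySem.Dict.items_insert_of_not_contains (d := d) (v := pvValD v)
        (by simpa using hc)
      rw [h] at hitems
      exact ih (pvPure d v) p (t ++ [(pvLangD v, pvValD v)]) (by simpa [pvPure] using hitems)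

-- ===== VERDICT (by name: the statement is the Claim_ definition above) =====
theorem sanitize_languages_spec : Claim_equal_sanitize_languages := by
  intro values _ hpre
  unfold Spec_sanitize_languages
  have hpre' : ∀ v ∈ values, (pvLookup v "language").isSome = true ∧
      (pvLookup v "value").isSome = true :=
    fun v hv => ⟨(hpre v hv).1, (hpre v hv).2.1⟩
  cases values with
  | nil => rfl
  | cons v0 rest =>
    obtain ⟨l0, hl0⟩ := Option.isSome_iff_exists.mp (hpre' v0 (by simp)).1
    have hl0' : pvLangD v0 = l0 := by simp [pvLangD, hl0]
    -- A's dict lookups = reverse-list find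
    have hget : ∀ k, (rest.foldl pvPure (pvPure PySem.Dict.empty v0)).get? k =
        (((v0 :: rest).reverse.find? (fun v => pvLangD v == k)).map pvValD) := by
      intro k
      have := get?_pvPure_foldl (v0 :: rest) PySem.Dict.empty k
      simp only [List.foldl_cons] at this
      rw [this]; simp
    -- A's first dict entry
    have hd0 : (pvPure PySem.Dict.empty v0).items = [(pvLangD v0, pvValD v0)] := by
      simp [pvPure, PySem.Dict.items_insert_of_not_contains, PySem.Dict.empty]
    obtain ⟨w, t', hitems⟩ := head_pvPure_foldl rest (pvPure PySem.Dict.empty v0)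
      (pvLangD v0, pvValD v0) [] hd0
    have hw : (((v0 :: rest).reverse.find? (fun v => pvLangD v == pvLangD v0)).map pvValD)
        = some w := by
      rw [← hget (pvLangD v0)]
      rw [show rest.foldl pvPure (pvPure PySem.Dict.empty v0) =
          PySem.Dict.mk ((pvLangD v0, w) :: t') from PySem.Dict.ext hitems]
      simp [PySem.Dict.get?_mk_cons]
    -- reduce A
    have hredA : sanitize_languages (v0 :: rest) =
        pyOr (((v0 :: rest).reverse.find? (fun v => pvLangD v == "en")).map pvValD)
          (pyOr (((v0 :: rest).reverse.find? (fun v => pvLangD v == "fr")).map pvValD) w) := by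
      rw [sanitize_languages, pvFold_eq _ _ hpre']
      show (match (rest.foldl pvPure (pvPure PySem.Dict.empty v0)).items with
        | [] => ""
        | p :: _ => pyOr ((rest.foldl pvPure (pvPure PySem.Dict.empty v0)).get? "en")
            (pyOr ((rest.foldl pvPure (pvPure PySem.Dict.empty v0)).get? "fr") p.2)) = _
      rw [hitems, hget "en", hget "fr"]
    -- reduce B
    have hsel1 : ∀ st v, (pvPureB l0 st v).1 =
        if pvLangD v = "en" then some (pvValD v) else st.1 := fun _ _ => rfl
    have hsel2 : ∀ st v, (pvPureB l0 st v).2.1 =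
        if pvLangD v = "fr" then some (pvValD v) else st.2.1 := fun _ _ => rfl
    have hsel3 : ∀ st v, (pvPureB l0 st v).2.2 =
        if pvLangD v = l0 then some (pvValD v) else st.2.2 := fun _ _ => rfl
    have hB1 := sel_pvPureB_foldl l0 "en" (·.1) hsel1 (v0 :: rest) (none, none, none)
    have hB2 := sel_pvPureB_foldl l0 "fr" (·.2.1) hsel2 (v0 :: rest) (none, none, none)
    have hB3 := sel_pvPureB_foldl l0 l0 (·.2.2) hsel3 (v0 :: rest) (none, none, none)
    simp only [Option.or_none] at hB1 hB2 hB3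
    have hredB : sanitize_languages_alt (v0 :: rest) =
        pyOr (((v0 :: rest).reverse.find? (fun v => pvLangD v == "en")).map pvValD)
          (pyOr (((v0 :: rest).reverse.find? (fun v => pvLangD v == "fr")).map pvValD) w) := by
      rw [sanitize_languages_alt]
      rw [show pvLookup v0 "language" = some l0 from hl0]
      show (match (v0 :: rest).foldl (pvStepB l0) (some (none, none, none)) with
        | none => ""
        | some (en, fr, fv) => pyOr en (pyOr fr (fv.getD ""))) = _
      rw [pvFoldB_eq l0 (v0 :: rest) (none, none, none) hpre']
      show pyOr ((v0 :: rest).foldl (pvPureB l0) (none, none, none)).1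
          (pyOr ((v0 :: rest).foldl (pvPureB l0) (none, none, none)).2.1
            (((v0 :: rest).foldl (pvPureB l0) (none, none, none)).2.2.getD "")) = _
      rw [hB1, hB2, hB3, ← hl0', hw]
      rfl
    rw [hredA, hredB]
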